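-- pv_equiv track=rewrite | github.com/PasqualiRafael/HackerRank | Algorithms/angry_professor.py | solve
-- ===== SOURCE A (Python) =====
-- def solve(min_students, arrival_time):
--     arrival_time.sort()
--     on_time = 0
--     for x in arrival_time:
--         if x <= 0:
--             on_time += 1
--     if on_time >= min_students:
--         return f"NO"
--     else:
--         return f"YES"
-- ===== SOURCE B (Python) =====
-- def solve(min_students, arrival_time):
--     arrival_time.sort()
--     # the sorted list has all non-positive values in a prefix:
--     # binary-search for the boundary instead of counting element by element
--     lo, hi = 0, len(arrival_time)
--     while lo < hi:
--         mid = (lo + hi) // 2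
--         if arrival_time[mid] > 0:
--             hi = mid
--         else:
--             lo = mid + 1
--     return "NO" if lo >= min_students else "YES"
-- ===== Notes on version B (the rewrite author's own statement) =====
-- stated objective: alternative
-- what changed: After the (kept) in-place sort, B replaces A's linear scan counting non-positive arrivals with a hand-written binary search for the boundary between non-positive and positive values, using O(log n) comparisons instead of O(n).
import Mathlib
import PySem

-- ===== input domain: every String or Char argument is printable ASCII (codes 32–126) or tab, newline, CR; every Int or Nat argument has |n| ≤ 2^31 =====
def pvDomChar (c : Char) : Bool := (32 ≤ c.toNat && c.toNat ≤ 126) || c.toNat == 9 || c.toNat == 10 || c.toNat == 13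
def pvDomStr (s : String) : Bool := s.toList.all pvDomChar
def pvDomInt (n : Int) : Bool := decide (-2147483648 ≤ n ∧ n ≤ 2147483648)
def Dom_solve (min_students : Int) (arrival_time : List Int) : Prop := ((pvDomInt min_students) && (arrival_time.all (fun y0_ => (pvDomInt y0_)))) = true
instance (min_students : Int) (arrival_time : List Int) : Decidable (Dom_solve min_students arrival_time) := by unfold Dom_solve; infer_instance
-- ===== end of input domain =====

-- B keeps A's in-place sort of arrival_time (same observable mutation) but replaces the
-- linear count of non-positive arrivals with a binary search for the boundary; the
-- equivalence proved here is about the RETURN value.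


-- ===== PORT A =====
def solve (min_students : Int) (arrival_time : List Int) : String :=
  let a := PySem.List.sorted arrival_time (fun x => x) false
  let on_time := a.foldl (fun acc x => if x ≤ 0 then acc + 1 else acc) (0 : Int)
  if on_time ≥ min_students then "NO" else "YES"

-- ===== PORT B =====
-- the while-loop of Source B as structural recursion on hi - lo
def bsearchPos (a : List Int) (lo hi : Nat) : Nat :=
  if h : lo < hi then
    let mid := (lo + hi) / 2
    if a.getD mid 0 > 0 then bsearchPos a lo mid
    else bsearchPos a (mid + 1) hi
  else lo
termination_by hi - lo
decreasing_by
  · have h1 : lo * 2 ≤ lo + hi := by omega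
    have h2 : lo ≤ (lo + hi) / 2 := Nat.le_div_iff_mul_le (by omega) |>.mpr h1
    have h3 : (lo + hi) / 2 < hi := Nat.div_lt_of_lt_mul (by omega)
    omega
  · have h3 : (lo + hi) / 2 < hi := Nat.div_lt_of_lt_mul (by omega)
    omega

def solve_alt (min_students : Int) (arrival_time : List Int) : String :=
  let a := PySem.List.sorted arrival_time (fun x => x) false
  let lo := bsearchPos a 0 a.length
  if (lo : Int) ≥ min_students then "NO" else "YES"

-- ===== PRECONDITION & SPEC =====
def Spec_solve (min_students : Int) (arrival_time : List Int) (out : String) : Prop := out = solve_alt min_students arrival_time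
instance (min_students : Int) (arrival_time : List Int) (out : String) : Decidable (Spec_solve min_students arrival_time out) := by unfold Spec_solve; infer_instance

-- ===== CLAIM (what is proved, stated in full; the proofs are below) =====
def Claim_equal_solve : Prop := ∀ (min_students : Int) (arrival_time : List Int), Dom_solve min_students arrival_time → Spec_solve min_students arrival_time (solve min_students arrival_time)

-- ===== LEMMAS AND PROOFS =====

-- A's counting loop computes countP
theorem foldl_count_nonpos (l : List Int) (n : Int) :
    l.foldl (fun acc x => if x ≤ 0 then acc + 1 else acc) n
      = n + (l.countP (fun x => decide (x ≤ 0)) : Int) := by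
  induction l generalizing n with
  | nil => simp
  | cons x xs ih =>
      simp only [List.foldl_cons, List.countP_cons, ih]
      by_cases h : x ≤ 0 <;> simp [h] <;> omega

-- on a sorted list, the non-positive elements form a prefix of length countP
theorem prefix_char (a : List Int) (hp : a.Pairwise (· ≤ ·)) :
    ∀ i, i < a.length →
      (a.getD i 0 ≤ 0 ↔ i < a.countP (fun x => decide (x ≤ 0))) := by
  induction a with
  | nil => intro i hi; simp at hi
  | cons x xs ih =>
      rcases List.pairwise_cons.mp hp with ⟨hx, hxs⟩
      intro i hi
      cases i with
      | zero =>
          simp only [List.getD_cons_zero, List.countP_cons]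
          by_cases h : x ≤ 0
          · simp [h]
          · have hz : xs.countP (fun x => decide (x ≤ 0)) = 0 := by
              apply List.countP_eq_zero.mpr
              intro y hy
              have := hx y hy
              simp; omega
            simp [h, hz]
      | succ j =>
          simp only [List.getD_cons_succ, List.countP_cons]
          have hj : j < xs.length := by simpa using hi
          rw [ih hxs j hj]
          by_cases h : x ≤ 0
          · simp [h]
          · have hz : xs.countP (fun x => decide (x ≤ 0)) = 0 := by
              apply List.countP_eq_zero.mpr
              intro y hy
              have := hx y hy
              simp; omega
            simp [h, hz]

-- the binary search lands exactly on countP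
theorem bsearch_eq (a : List Int) (hp : a.Pairwise (· ≤ ·)) (lo hi : Nat)
    (hhi : hi ≤ a.length)
    (h1 : lo ≤ a.countP (fun x => decide (x ≤ 0)))
    (h2 : a.countP (fun x => decide (x ≤ 0)) ≤ hi) :
    bsearchPos a lo hi = a.countP (fun x => decide (x ≤ 0)) := by
  fun_induction bsearchPos a lo hi with
  | case1 lo hi h mid hpos ih =>
      have hmid : mid < a.length := by
        have : mid < hi := Nat.div_lt_of_lt_mul (by omega)
        omega
      have hle : a.countP (fun x => decide (x ≤ 0)) ≤ mid := by
        by_contra hlt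
        have := (prefix_char a hp mid hmid).mpr (by omega)
        omega
      exact ih (by omega) h1 hle
  | case2 lo hi h mid hpos ih =>
      have hmid : mid < a.length := by
        have : mid < hi := Nat.div_lt_of_lt_mul (by omega)
        omega
      have hlt : mid < a.countP (fun x => decide (x ≤ 0)) :=
        (prefix_char a hp mid hmid).mp (by omega)
      exact ih hhi (by omega) h2
  | case3 lo hi h => omega

-- ===== VERDICT (by name: the statement is the Claim_ definition above) =====
theorem solve_spec : Claim_equal_solve := by
  intro m at_ _
  unfold Spec_solve
  have hp : (PySem.List.sorted at_ (fun x => x) false).Pairwise (· ≤ ·) :=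
    PySem.List.sorted_pairwise at_ (fun x => x)
  show (if (PySem.List.sorted at_ (fun x => x) false).foldl
            (fun acc x => if x ≤ 0 then acc + 1 else acc) (0 : Int) ≥ m then "NO" else "YES")
      = (if ((bsearchPos (PySem.List.sorted at_ (fun x => x) false) 0
              (PySem.List.sorted at_ (fun x => x) false).length : Int)) ≥ m then "NO" else "YES")
  rw [foldl_count_nonpos,
      bsearch_eq _ hp 0 _ le_rfl (Nat.zero_le _) List.countP_le_length]
  simp
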